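-- pv_equiv track=rewrite | github.com/hwan515/Algorithm_Python | 프로그래머스/unrated/120812. 최빈값 구하기/최빈값 구하기.py | solution
-- ===== SOURCE A (Python) =====
-- from collections import Counter
--
-- def solution(array):
--     answer = 0
--     arr = Counter(array)
--     count = 0
--
--     max_value = max(arr.values())
--
--     for key in arr:
--         if arr[key] == max_value:
--             count += 1
--             answer = key
--     if count > 1:
--         return -1
--
--     return answer
-- ===== SOURCE B (Python) =====
-- def solution(array):
--     # One-pass streaming mode: maintain counts plus the running argmax and a tie flag.
--     counts = {}
--     ans, best, tie = -1, 0, False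
--     for x in array:
--         c = counts.get(x, 0) + 1
--         counts[x] = c
--         if c > best:
--             ans, best, tie = x, c, False
--         elif c == best:
--             tie = True
--     return -1 if tie else ans
-- ===== Notes on version B (the rewrite author's own statement) =====
-- stated objective: alternative
-- what changed: Replaces A's three-phase Counter pipeline (count all, take max of values, rescan all keys counting max-hitters) by a single streaming pass over the array that maintains counts together with the running argmax and a tie flag.
import Mathlib
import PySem

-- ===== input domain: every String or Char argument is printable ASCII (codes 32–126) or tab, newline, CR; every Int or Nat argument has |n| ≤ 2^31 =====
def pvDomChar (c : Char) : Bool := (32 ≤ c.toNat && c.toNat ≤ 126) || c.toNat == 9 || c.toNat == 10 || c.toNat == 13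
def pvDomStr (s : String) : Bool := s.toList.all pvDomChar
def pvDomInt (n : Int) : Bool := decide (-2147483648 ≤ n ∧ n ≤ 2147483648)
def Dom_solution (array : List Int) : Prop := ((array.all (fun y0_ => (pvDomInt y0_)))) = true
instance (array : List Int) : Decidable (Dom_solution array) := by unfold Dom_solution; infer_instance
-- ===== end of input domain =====

-- B is an 'alternative': one streaming pass with a running argmax and tie flag, instead of
-- A's count-all / max-of-values / rescan-keys pipeline. Same asymptotic cost.

-- ===== PORT A =====
-- answer = 0; arr = Counter(array); max_value = max(arr.values());
-- for key in arr: if arr[key] == max_value: count += 1; answer = key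
-- (arr[key] with key taken from arr's own keys always hits: ported as getD _ 0)
def solution (array : List Int) : Int :=
  let arr := PySem.Dict.counter array
  match PySem.List.max? arr.values (fun v => v) with
  | none => 0   -- Python: max() raises ValueError here; excluded by Pre_solution
  | some max_value =>
    let s := arr.keys.foldl
      (fun (s : Int × Int) key =>
        if arr.getD key 0 == max_value then (s.1 + 1, key) else s) (0, 0)
    if s.1 > 1 then -1 else s.2

-- ===== PORT B =====
-- state = (counts, ans, best, tie); one pass over the array
def solution_alt (array : List Int) : Int :=
  let st := array.foldl
    (fun (st : PySem.Dict Int Int × Int × Int × Bool) x =>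
      let c := st.1.getD x 0 + 1
      let counts := st.1.insert x c
      if c > st.2.2.1 then (counts, x, c, false)
      else if c == st.2.2.1 then (counts, st.2.1, st.2.2.1, true)
      else (counts, st.2.1, st.2.2.1, st.2.2.2))
    (PySem.Dict.empty, -1, 0, false)
  if st.2.2.2 then -1 else st.2.1

-- ===== PRECONDITION & SPEC =====
-- Pre_ excludes only the empty list, on which Python A raises ValueError (max of no values).
def Pre_solution (array : List Int) : Prop := array ≠ []
instance (array : List Int) : Decidable (Pre_solution array) := by unfold Pre_solution; infer_instance
def pvWitness_solution : List Int := [1, 2, 2]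

def Spec_solution (array : List Int) (out : Int) : Prop := out = solution_alt array
instance (array : List Int) (out : Int) : Decidable (Spec_solution array out) := by unfold Spec_solution; infer_instance

-- ===== CLAIM (what is proved, stated in full; the proofs are below) =====
def Claim_equal_solution : Prop := ∀ (array : List Int), Dom_solution array → Pre_solution array → Spec_solution array (solution array)


-- ===== LEMMAS AND PROOFS =====

-- B's fold step, named for the proofs (definitionally the lambda inside solution_alt)
def pvStep (st : PySem.Dict Int Int × Int × Int × Bool) (x : Int) :
    PySem.Dict Int Int × Int × Int × Bool :=
  if st.1.getD x 0 + 1 > st.2.2.1 then (st.1.insert x (st.1.getD x 0 + 1), x, st.1.getD x 0 + 1, false)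
  else if st.1.getD x 0 + 1 == st.2.2.1 then (st.1.insert x (st.1.getD x 0 + 1), st.2.1, st.2.2.1, true)
  else (st.1.insert x (st.1.getD x 0 + 1), st.2.1, st.2.2.1, st.2.2.2)

def pvInit : PySem.Dict Int Int × Int × Int × Bool := (PySem.Dict.empty, -1, 0, false)

lemma solution_alt_eq (array : List Int) :
    solution_alt array =
      (if (array.foldl pvStep pvInit).2.2.2 then -1 else (array.foldl pvStep pvInit).2.1) := rfl

-- "key k has maximal count m" as a Bool predicate
def pvP (p : List Int) (m : Int) : Int → Bool := fun k => (List.count k p : Int) == m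

-- loop invariant of B's fold over the processed prefix p
def pvInv (p : List Int) (st : PySem.Dict Int Int × Int × Int × Bool) : Prop :=
  st.1 = PySem.Dict.counter p ∧
  (∀ k ∈ p, (List.count k p : Int) ≤ st.2.2.1) ∧
  (st.2.2.1 = 0 ∨ ∃ k ∈ p, (List.count k p : Int) = st.2.2.1) ∧
  st.2.2.2 = decide (1 < (PySem.Set.ofList p).countP (pvP p st.2.2.1)) ∧
  (st.2.2.2 = false → p = [] ∨ (List.count st.2.1 p : Int) = st.2.2.1)

lemma pvCount (p : List Int) (x y : Int) :
    List.count y (p ++ [x]) = List.count y p + (if y = x then 1 else 0) := by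
  by_cases h : y = x
  · subst h; simp [List.count_append]
  · simp [List.count_append, h, (Ne.symm h : x ≠ y)]

lemma pvMemOfAppend {p : List Int} {x k : Int} (hk : k ∈ p ++ [x]) (hkx : k ≠ x) : k ∈ p := by
  rcases List.mem_append.mp hk with h' | h'
  · exact h'
  · simp at h'; exact absurd h' hkx

lemma pvCounter_append (p : List Int) (x : Int) :
    PySem.Dict.counter (p ++ [x])
      = (PySem.Dict.counter p).insert x ((List.count x p : Int) + 1) := by
  rw [← PySem.Dict.foldl_insert_getD_add_one_eq_counter, List.foldl_append,
      PySem.Dict.foldl_insert_getD_add_one_eq_counter]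
  simp [PySem.Dict.getD_counter]

lemma pvOfList_append (p : List Int) (x : Int) :
    PySem.Set.ofList (p ++ [x]) =
      if x ∈ p then PySem.Set.ofList p else PySem.Set.ofList p ++ [x] := by
  rw [PySem.Set.ofList_eq_foldl, List.foldl_append, ← PySem.Set.ofList_eq_foldl]
  by_cases h : x ∈ p <;>
    simp [PySem.Set.add, PySem.Set.contains, PySem.Set.mem_ofList, h]

lemma pvFilterSingle {l : List Int} {P : Int → Bool} {x : Int}
    (hnd : l.Nodup) (hx : x ∈ l) (h : ∀ k ∈ l, (P k = true ↔ k = x)) :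
    l.filter P = [x] := by
  induction l with
  | nil => simp at hx
  | cons a t ih =>
    have hna : a ∉ t := (List.nodup_cons.mp hnd).1
    have hnt : t.Nodup := (List.nodup_cons.mp hnd).2
    by_cases hax : a = x
    · subst hax
      have ht : t.filter P = [] := by
        rw [List.filter_eq_nil_iff]
        intro k hk hPk
        exact hna (((h k (List.mem_cons_of_mem _ hk)).mp hPk) ▸ hk)
      simp [(h a (List.mem_cons_self)).mpr rfl, ht]
    · have hxt : x ∈ t := by
        rcases List.mem_cons.mp hx with h' | h'
        · exact absurd h'.symm hax
        · exact h'
      have hPa : P a = false := by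
        rcases hP : P a with _ | _
        · rfl
        · exact absurd ((h a List.mem_cons_self).mp hP) hax
      simp [hPa,
        ih hnt hxt (fun k hk => h k (List.mem_cons_of_mem _ hk))]

lemma pvTwoMem {l : List Int} {P : Int → Bool} {a b : Int}
    (ha : a ∈ l) (hb : b ∈ l) (hab : a ≠ b)
    (hPa : P a = true) (hPb : P b = true) : 1 < l.countP P := by
  have ha' : a ∈ l.filter P := List.mem_filter.mpr ⟨ha, hPa⟩
  have hb' : b ∈ l.filter P := List.mem_filter.mpr ⟨hb, hPb⟩
  rw [List.countP_eq_length_filter]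
  rcases hf : l.filter P with _ | ⟨z, _ | ⟨w, r⟩⟩
  · rw [hf] at ha'; simp at ha'
  · rw [hf] at ha' hb'
    simp at ha' hb'
    exact absurd (ha'.trans hb'.symm) hab
  · simp

lemma pvInv_fold (p : List Int) : pvInv p (p.foldl pvStep pvInit) := by
  induction p using List.reverseRecOn with
  | nil =>
    exact ⟨rfl, by simp, Or.inl rfl, by decide, fun _ => Or.inl rfl⟩
  | append_singleton p x ih =>
    rw [List.foldl_append, List.foldl_cons, List.foldl_nil]
    generalize hA : p.foldl pvStep pvInit = st at ih
    obtain ⟨d, ans, best, tie⟩ := st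
    obtain ⟨h1, h2, h3, h4, h5⟩ := ih
    simp only at h1 h2 h3 h4 h5
    have hgetD : d.getD x 0 = (List.count x p : Int) := by
      rw [h1, PySem.Dict.getD_counter]
    have hnd' : (PySem.Set.ofList (p ++ [x])).Nodup := PySem.Set.nodup_ofList _
    have hmem' : ∀ y : Int, y ∈ PySem.Set.ofList (p ++ [x]) ↔ (y ∈ p ∨ y = x) := by
      intro y; rw [PySem.Set.mem_ofList]; simp
    unfold pvStep
    simp only [hgetD]
    by_cases hgt : (List.count x p : Int) + 1 > best
    · -- new strict maximum
      rw [if_pos hgt]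
      refine ⟨?_, ?_, ?_, ?_, ?_⟩
      · simp only [pvCounter_append, h1]
      · intro k hk
        rw [pvCount]
        by_cases hkx : k = x
        · simp [hkx]
        · have := h2 k (pvMemOfAppend hk hkx)
          simp [hkx]; omega
      · exact Or.inr ⟨x, List.mem_append_right _ (by simp), by rw [pvCount]; simp⟩
      · have hfil : (PySem.Set.ofList (p ++ [x])).filter
            (pvP (p ++ [x]) ((List.count x p : Int) + 1)) = [x] := by
          apply pvFilterSingle hnd' ((hmem' x).mpr (Or.inr rfl))
          intro k hk
          unfold pvP
          rw [pvCount]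
          constructor
          · intro hPk
            by_contra hkx
            have hkp : k ∈ p := by
              rcases (hmem' k).mp hk with h' | h'
              · exact h'
              · exact absurd h' hkx
            have := h2 k hkp
            simp [hkx] at hPk
            omega
          · intro hkx; simp [hkx]
        simp only [List.countP_eq_length_filter, hfil]
        simp
      · intro _
        exact Or.inr (by rw [pvCount]; simp)
    · rw [if_neg hgt]
      by_cases heq : ((List.count x p : Int) + 1) = best
      · -- ties the current maximum
        rw [if_pos (by simpa using heq)]
        have hbest1 : (1 : Int) ≤ best := by omega
        have hex : ∃ k ∈ p, (List.count k p : Int) = best := by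
          rcases h3 with h' | h'
          · omega
          · exact h'
        obtain ⟨k, hkp, hkc⟩ := hex
        have hkx : k ≠ x := by
          intro h'; subst h'; omega
        refine ⟨?_, ?_, ?_, ?_, ?_⟩
        · simp only [pvCounter_append, h1]
        · intro j hj
          rw [pvCount]
          by_cases hjx : j = x
          · simp [hjx]; omega
          · have := h2 j (pvMemOfAppend hj hjx)
            simp [hjx]; omega
        · exact Or.inr ⟨x, List.mem_append_right _ (by simp), by rw [pvCount]; simp; omega⟩
        · symm
          rw [decide_eq_true_iff]
          apply pvTwoMem ((hmem' x).mpr (Or.inr rfl)) ((hmem' k).mpr (Or.inl hkp)) (Ne.symm hkx)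
          · unfold pvP; rw [pvCount]; simp; omega
          · unfold pvP; rw [pvCount]; simp [hkx]; omega
        · intro h'; simp at h'
      · -- strictly below the current maximum
        rw [if_neg (by simpa using heq)]
        have hlt : (List.count x p : Int) + 1 < best := by omega
        have hex : ∃ k ∈ p, (List.count k p : Int) = best := by
          rcases h3 with h' | h'
          · omega
          · exact h'
        obtain ⟨k, hkp, hkc⟩ := hex
        have hkx : k ≠ x := by
          intro h'; subst h'; omega
        have hcntP : (PySem.Set.ofList (p ++ [x])).countP (pvP (p ++ [x]) best)
            = (PySem.Set.ofList p).countP (pvP p best) := by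
          have hagree : ∀ j ∈ PySem.Set.ofList p,
              (pvP (p ++ [x]) best j = true ↔ pvP p best j = true) := by
            intro j hj
            have hjp : j ∈ p := (PySem.Set.mem_ofList _ _).mp hj
            unfold pvP
            rw [pvCount]
            by_cases hjx : j = x
            · subst hjx
              constructor <;> intro h' <;> simp at h' <;> omega
            · simp [hjx]
          rw [pvOfList_append]
          by_cases hxp : x ∈ p
          · rw [if_pos hxp]
            exact List.countP_congr hagree
          · rw [if_neg hxp]
            rw [List.countP_append]
            have hx0 : List.countP (pvP (p ++ [x]) best) [x] = 0 := by
              have hcx : List.count x p = 0 := List.count_eq_zero.mpr hxp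
              simp only [List.countP_cons, List.countP_nil]
              unfold pvP
              rw [pvCount]
              simp [hcx]
              omega
            rw [hx0, List.countP_congr hagree]
            omega
        refine ⟨?_, ?_, ?_, ?_, ?_⟩
        · simp only [pvCounter_append, h1]
        · intro j hj
          rw [pvCount]
          by_cases hjx : j = x
          · simp [hjx]; omega
          · have := h2 j (pvMemOfAppend hj hjx)
            simp [hjx]; omega
        · exact Or.inr ⟨k, List.mem_append_left _ hkp, by rw [pvCount]; simp [hkx]; omega⟩
        · rw [h4, hcntP]
        · intro htie
          rcases h5 htie with h' | h'
          · subst h'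
            rcases h3 with hb | hb
            · simp at hlt; omega
            · obtain ⟨k', hk', _⟩ := hb; simp at hk'
          · have hansx : ans ≠ x := by
              intro h''; subst h''; omega
            exact Or.inr (by rw [pvCount]; simp [hansx]; omega)

-- A's key-scan loop, characterised
lemma pvScan (P : Int → Bool) (l : List Int) (c0 a0 : Int) :
    l.foldl (fun s k => if P k then (s.1 + 1, k) else s) (c0, a0)
      = (c0 + (l.countP P : Int), (l.filter P).getLastD a0) := by
  induction l generalizing c0 a0 with
  | nil => simp
  | cons y t ih =>
    by_cases hy : P y = true
    · have hc : List.countP P (y :: t) = List.countP P t + 1 := by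
        simp [hy]
      have hl : List.filter P (y :: t) = y :: List.filter P t := by
        simp [hy]
      rw [List.foldl_cons, if_pos hy, ih, hc, hl, List.getLastD_cons]
      simp only [Prod.mk.injEq]
      refine ⟨by push_cast; ring, trivial⟩
    · have hc : List.countP P (y :: t) = List.countP P t := by
        simp [hy]
      have hl : List.filter P (y :: t) = List.filter P t := by
        simp [hy]
      rw [List.foldl_cons, if_neg hy, ih, hc, hl]

lemma pvMain (array : List Int) (h : array ≠ []) : solution array = solution_alt array := by
  obtain ⟨h1, h2, h3, h4, h5⟩ := pvInv_fold array
  set st := array.foldl pvStep pvInit with hst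
  obtain ⟨a0, t0⟩ := List.exists_cons_of_ne_nil h
  obtain ⟨t, ht⟩ := t0
  have ha0 : a0 ∈ array := by rw [ht]; simp
  have hvals : (PySem.Dict.counter array).values
      = (PySem.Set.ofList array).map (fun k => (List.count k array : Int)) := by
    simp only [PySem.Dict.values, PySem.Dict.items_counter, List.map_map]
    rfl
  rw [solution_alt_eq]
  unfold solution
  cases hmax : PySem.List.max? (PySem.Dict.counter array).values (fun v => v) with
  | none =>
    exfalso
    have hnil := (PySem.List.max?_eq_none_iff _ _).mp hmax
    rw [hvals] at hnil
    have : a0 ∈ PySem.Set.ofList array := (PySem.Set.mem_ofList _ _).mpr ha0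
    rw [List.map_eq_nil_iff.mp hnil] at this
    simp at this
  | some m =>
    simp only [hmax]
    -- m is the maximum count, equal to B's `best`
    have hmmem := PySem.List.max?_mem hmax
    have hmub := PySem.List.max?_isMax hmax
    rw [hvals] at hmmem hmub
    obtain ⟨km, hkm, hkmc⟩ := List.mem_map.mp hmmem
    have hkmp : km ∈ array := (PySem.Set.mem_ofList _ _).mp hkm
    have hmle : m ≤ st.2.2.1 := hkmc ▸ h2 km hkmp
    have hbex : ∃ k ∈ array, (List.count k array : Int) = st.2.2.1 := by
      rcases h3 with h' | h'
      · exfalso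
        have := h2 a0 ha0
        have : 0 < List.count a0 array := List.count_pos_iff.mpr ha0
        omega
      · exact h'
    obtain ⟨kb, hkb, hkbc⟩ := hbex
    have hbm : st.2.2.1 ≤ m := by
      have : (List.count kb array : Int) ∈
          (PySem.Set.ofList array).map (fun k => (List.count k array : Int)) :=
        List.mem_map.mpr ⟨kb, (PySem.Set.mem_ofList _ _).mpr hkb, rfl⟩
      have := hmub _ this
      omega
    have hmb : m = st.2.2.1 := le_antisymm hmle hbm
    -- A's scan over the counter's keys
    have hfun : (fun (s : Int × Int) key =>
          if (PySem.Dict.counter array).getD key 0 == m then (s.1 + 1, key) else s)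
        = (fun (s : Int × Int) key => if pvP array m key then (s.1 + 1, key) else s) := by
      funext s key
      rw [PySem.Dict.getD_counter]
      rfl
    rw [PySem.Dict.keys_counter, hfun, pvScan]
    set n := (PySem.Set.ofList array).countP (pvP array m) with hn
    by_cases hn1 : 1 < n
    · -- a tie: both return -1
      have htie : st.2.2.2 = true := by
        rw [h4, ← hmb]
        exact decide_eq_true hn1
      have hgt : (0 : Int) + (n : Int) > 1 := by omega
      rw [htie, if_pos hgt]
      simp
    · -- unique mode
      have hnpos : 0 < n := by
        rw [hn]
        apply List.countP_pos_iff.mpr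
        exact ⟨kb, (PySem.Set.mem_ofList _ _).mpr hkb, by unfold pvP; rw [hkbc, hmb]; simp⟩
      have hne1 : n = 1 := by omega
      obtain ⟨u, hu⟩ := List.length_eq_one_iff.mp
        (by rw [← List.countP_eq_length_filter, ← hn]; exact hne1)
      have htie : st.2.2.2 = false := by
        rw [h4, ← hmb, ← hn, hne1]
        decide
      rw [htie]
      have hnlt : ¬ ((1 : Int) < 0 + (n : Int)) := by omega
      rw [hu]
      simp only [List.getLastD_cons, List.getLastD_nil]
      rw [if_neg hnlt, if_neg (by simp)]
      -- ans is a key of maximal count, hence the unique one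
      rcases h5 htie with h' | h'
      · exact absurd h' h
      · have hanspos : 0 < List.count st.2.1 array := by
          have : 0 < List.count kb array := List.count_pos_iff.mpr hkb
          omega
        have hansmem : st.2.1 ∈ PySem.Set.ofList array :=
          (PySem.Set.mem_ofList _ _).mpr (List.count_pos_iff.mp hanspos)
        have : st.2.1 ∈ (PySem.Set.ofList array).filter (pvP array m) :=
          List.mem_filter.mpr ⟨hansmem, by unfold pvP; rw [h', hmb]; simp⟩
        rw [hu] at this
        simp at this
        rw [this]

-- ===== VERDICT (by name: the statement is the Claim_ definition above) =====
theorem solution_spec : Claim_equal_solution := by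
  intro array _ hpre
  unfold Spec_solution
  exact pvMain array hpre
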